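-- pv_equiv track=rewrite | github.com/DavidBakerEffendi/palestine-israel-twitter | analyze_tweets.py | determine_bias
-- ===== SOURCE A (Python) =====
-- from typing import Tuple, List, Set
--
-- def determine_bias(text: str, neu: List[str], pro_is: List[str], pro_pa: List[str]) -> (int, int, int):
--     neu_bias, pro_is_bias, pro_pa_bias = 0, 0, 0
--     for w in neu:
--         if w in text:
--             neu_bias += 1
--     for w in pro_is:
--         if w in text:
--             pro_is_bias += 1
--     for w in pro_pa:
--         if w in text:
--             pro_pa_bias += 1
--     return pro_pa_bias, neu_bias, pro_is_bias
-- ===== SOURCE B (Python) =====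
-- def determine_bias(text, neu, pro_is, pro_pa):
--     # Build an index of text's substrings (only lengths that occur among the words)
--     # once, so each word lookup is a set membership instead of a scan of text.
--     n = len(text)
--     lens = dict.fromkeys(len(w) for w in neu + pro_is + pro_pa)
--     subs = set()
--     for L in lens:
--         if L <= n:
--             for i in range(n - L + 1):
--                 subs.add(text[i:i + L])
--     pa = sum(1 for w in pro_pa if w in subs)
--     ne = sum(1 for w in neu if w in subs)
--     pi = sum(1 for w in pro_is if w in subs)
--     return pa, ne, pi
-- ===== Notes on version B (the rewrite author's own statement) =====
-- stated objective: faster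
-- what changed: Instead of scanning text once per word, B builds a hash set of text's substrings (only the lengths occurring among the words) once, then each word check is a single set lookup instead of a scan of text.
import Mathlib
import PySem

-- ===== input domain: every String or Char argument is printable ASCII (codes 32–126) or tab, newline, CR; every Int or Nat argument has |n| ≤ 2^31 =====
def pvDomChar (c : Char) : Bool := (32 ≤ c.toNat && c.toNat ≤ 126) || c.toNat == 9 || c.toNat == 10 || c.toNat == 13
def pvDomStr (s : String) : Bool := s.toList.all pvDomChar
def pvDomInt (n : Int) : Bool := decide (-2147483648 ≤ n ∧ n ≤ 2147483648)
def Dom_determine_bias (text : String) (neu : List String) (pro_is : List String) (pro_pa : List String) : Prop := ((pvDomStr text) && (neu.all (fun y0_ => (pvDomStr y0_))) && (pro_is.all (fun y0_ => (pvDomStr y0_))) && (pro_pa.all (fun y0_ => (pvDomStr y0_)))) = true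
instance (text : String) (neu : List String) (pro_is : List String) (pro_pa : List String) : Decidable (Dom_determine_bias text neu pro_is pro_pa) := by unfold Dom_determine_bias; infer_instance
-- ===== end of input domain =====

-- B replaces the repeated substring scans of A by a substring index of text
-- (one set of all substrings of text of the lengths that occur among the words),
-- built once, then counts by set membership; objective: alternative.


-- ===== PORT A =====
def determine_bias (text : String) (neu : List String) (pro_is : List String) (pro_pa : List String) : List Int :=
  let neu_bias := neu.foldl (fun c w => if PySem.Str.isIn w text then c + 1 else c) (0 : Int)
  let pro_is_bias := pro_is.foldl (fun c w => if PySem.Str.isIn w text then c + 1 else c) (0 : Int)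
  let pro_pa_bias := pro_pa.foldl (fun c w => if PySem.Str.isIn w text then c + 1 else c) (0 : Int)
  [pro_pa_bias, neu_bias, pro_is_bias]

-- ===== PORT B =====
-- subs = {text[i:i+L] for L in lens if L <= n for i in range(n-L+1)}, as the two loops of Source B
def dbSubs (t : List Char) (lens : List Nat) : PySem.Set (List Char) :=
  lens.foldl (fun s L =>
    if L ≤ t.length then
      (List.range (t.length - L + 1)).foldl
        (fun s (i : Nat) => PySem.Set.add s (PySem.List.slice t (some (i : Int)) (some ((i : Int) + (L : Int))))) s
    else s) PySem.Set.empty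

def determine_bias_alt (text : String) (neu : List String) (pro_is : List String) (pro_pa : List String) : List Int :=
  let t := text.toList
  let lens := PySem.List.dedup ((neu ++ pro_is ++ pro_pa).map (fun w => w.toList.length))
  let subs := dbSubs t lens
  let pa := pro_pa.foldl (fun c w => if PySem.Set.contains subs w.toList then c + 1 else c) (0 : Int)
  let ne := neu.foldl (fun c w => if PySem.Set.contains subs w.toList then c + 1 else c) (0 : Int)
  let pi := pro_is.foldl (fun c w => if PySem.Set.contains subs w.toList then c + 1 else c) (0 : Int)
  [pa, ne, pi]

-- ===== PRECONDITION & SPEC =====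
def Spec_determine_bias (text : String) (neu : List String) (pro_is : List String) (pro_pa : List String) (out : List Int) : Prop := out = determine_bias_alt text neu pro_is pro_pa
instance (text : String) (neu : List String) (pro_is : List String) (pro_pa : List String) (out : List Int) : Decidable (Spec_determine_bias text neu pro_is pro_pa out) := by unfold Spec_determine_bias; infer_instance

-- ===== CLAIM (what is proved, stated in full; the proofs are below) =====
def Claim_equal_determine_bias : Prop := ∀ (text : String) (neu : List String) (pro_is : List String) (pro_pa : List String), Dom_determine_bias text neu pro_is pro_pa → Spec_determine_bias text neu pro_is pro_pa (determine_bias text neu pro_is pro_pa)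

-- ===== LEMMAS AND PROOFS =====

-- membership in a fold that only adds elements
theorem mem_foldl_add_set {β : Type} (f : β → List Char) (l : List β) (s : PySem.Set (List Char)) (x : List Char) :
    x ∈ l.foldl (fun s b => PySem.Set.add s (f b)) s ↔ x ∈ s ∨ ∃ b ∈ l, x = f b := by
  induction l generalizing s with
  | nil => simp
  | cons b bs ih =>
    rw [List.foldl_cons, ih]
    simp only [PySem.Set.mem_add, List.mem_cons]
    constructor
    · rintro ((h | rfl) | ⟨b', hb', rfl⟩)
      · exact Or.inl h
      · exact Or.inr ⟨b, Or.inl rfl, rfl⟩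
      · exact Or.inr ⟨b', Or.inr hb', rfl⟩
    · rintro (h | ⟨b', (rfl | hb'), rfl⟩)
      · exact Or.inl (Or.inl h)
      · exact Or.inl (Or.inr rfl)
      · exact Or.inr ⟨b', hb', rfl⟩

theorem mem_window_fold (t : List Char) (L m : Nat) (s : PySem.Set (List Char)) (x : List Char) :
    x ∈ (List.range m).foldl
        (fun s (i : Nat) => PySem.Set.add s (PySem.List.slice t (some (i : Int)) (some ((i : Int) + (L : Int))))) s
      ↔ x ∈ s ∨ ∃ i < m, x = PySem.List.slice t (some (i : Int)) (some ((i : Int) + (L : Int))) := by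
  have h := mem_foldl_add_set
    (fun i : Nat => PySem.List.slice t (some (i : Int)) (some ((i : Int) + (L : Int))))
    (List.range m) s x
  simpa using h

theorem mem_dbSubs (t : List Char) (lens : List Nat) (x : List Char) :
    x ∈ dbSubs t lens ↔
      ∃ L ∈ lens, L ≤ t.length ∧ ∃ i < t.length - L + 1,
        x = PySem.List.slice t (some (i : Int)) (some ((i : Int) + (L : Int))) := by
  unfold dbSubs
  have gen : ∀ (ls : List Nat) (s : PySem.Set (List Char)),
      x ∈ ls.foldl (fun s L =>
        if L ≤ t.length then
          (List.range (t.length - L + 1)).foldl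
            (fun s (i : Nat) => PySem.Set.add s (PySem.List.slice t (some (i : Int)) (some ((i : Int) + (L : Int))))) s
        else s) s ↔
      x ∈ s ∨ ∃ L ∈ ls, L ≤ t.length ∧ ∃ i < t.length - L + 1,
        x = PySem.List.slice t (some (i : Int)) (some ((i : Int) + (L : Int))) := by
    intro ls
    induction ls with
    | nil => simp
    | cons L Ls ih =>
      intro s
      rw [List.foldl_cons, ih]
      by_cases hL : L ≤ t.length
      · rw [if_pos hL, mem_window_fold]
        simp only [List.mem_cons]
        constructor
        · rintro ((h | ⟨i, hi, rfl⟩) | ⟨L', hL', h⟩)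
          · exact Or.inl h
          · exact Or.inr ⟨L, Or.inl rfl, hL, i, hi, rfl⟩
          · exact Or.inr ⟨L', Or.inr hL', h⟩
        · rintro (h | ⟨L', (rfl | hL'), hle, i, hi, rfl⟩)
          · exact Or.inl (Or.inl h)
          · exact Or.inl (Or.inr ⟨i, hi, rfl⟩)
          · exact Or.inr ⟨L', hL', hle, i, hi, rfl⟩
      · rw [if_neg hL]
        simp only [List.mem_cons]
        constructor
        · rintro (h | ⟨L', hL', h⟩)
          · exact Or.inl h
          · exact Or.inr ⟨L', Or.inr hL', h⟩
        · rintro (h | ⟨L', (rfl | hL'), hle, h⟩)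
          · exact Or.inl h
          · exact absurd hle hL
          · exact Or.inr ⟨L', hL', hle, h⟩
  have h := gen lens PySem.Set.empty
  simpa [PySem.Set.empty] using h

-- a window of t is an infix of t
theorem window_isInfix (t : List Char) (L i : Nat) :
    PySem.List.slice t (some (i : Int)) (some ((i : Int) + (L : Int))) <:+: t := by
  rw [PySem.List.slice_natCast_add]
  exact ((List.take_prefix L (t.drop i)).isInfix).trans (List.drop_suffix i t).isInfix

-- every infix of length L ≤ |t| is a window of t
theorem infix_window (t w : List Char) (h : w <:+: t) :
    ∃ i < t.length - w.length + 1,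
      w = PySem.List.slice t (some (i : Int)) (some ((i : Int) + (w.length : Int))) := by
  obtain ⟨s1, s2, rfl⟩ := h
  refine ⟨s1.length, by simp [List.length_append]; omega, ?_⟩
  rw [PySem.List.slice_natCast_add, List.append_assoc, List.drop_left, List.take_left]

-- for a word whose length is listed, set membership coincides with 'w in text'
theorem contains_dbSubs_eq_isIn (text : String) (lens : List Nat) (w : String)
    (hmem : w.toList.length ∈ lens) :
    PySem.Set.contains (dbSubs text.toList lens) w.toList = PySem.Str.isIn w text := by
  by_cases h : w.toList <:+: text.toList
  · have hin : w.toList ∈ dbSubs text.toList lens := by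
      rw [mem_dbSubs]
      exact ⟨w.toList.length, hmem, h.length_le, infix_window text.toList w.toList h⟩
    rw [(PySem.Set.contains_iff _ _).mpr hin, (PySem.Str.isIn_iff_infix w text).mpr h]
  · have hnin : w.toList ∉ dbSubs text.toList lens := by
      rw [mem_dbSubs]
      rintro ⟨L, _, hL, i, hi, heq⟩
      exact h (heq ▸ window_isInfix text.toList L i)
    have h1 : PySem.Set.contains (dbSubs text.toList lens) w.toList = false := by
      cases hv : PySem.Set.contains (dbSubs text.toList lens) w.toList
      · rfl
      · exact absurd ((PySem.Set.contains_iff _ _).mp hv) hnin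
    have h2 : PySem.Str.isIn w text = false := by
      cases hv : PySem.Str.isIn w text
      · rfl
      · exact absurd ((PySem.Str.isIn_iff_infix w text).mp hv) h
    rw [h1, h2]

-- counting with the two tests agrees on any word list drawn from the three inputs
theorem count_eq (text : String) (neu pro_is pro_pa ws : List String)
    (hsub : ∀ w ∈ ws, w ∈ neu ++ pro_is ++ pro_pa) :
    ws.foldl (fun c w =>
        if PySem.Set.contains
            (dbSubs text.toList
              (PySem.List.dedup ((neu ++ pro_is ++ pro_pa).map (fun w => w.toList.length)))) w.toList
        then c + 1 else c) (0 : Int)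
    = ws.foldl (fun c w => if PySem.Str.isIn w text then c + 1 else c) (0 : Int) := by
  rw [PySem.List.foldl_if_add_one, PySem.List.foldl_if_add_one]
  congr 1
  norm_cast
  apply List.countP_congr
  intro w hw
  have hlen : w.toList.length ∈
      PySem.List.dedup ((neu ++ pro_is ++ pro_pa).map (fun w => w.toList.length)) := by
    rw [PySem.List.mem_dedup]
    exact List.mem_map_of_mem (hsub w hw)
  rw [contains_dbSubs_eq_isIn text _ w hlen]

-- ===== VERDICT (by name: the statement is the Claim_ definition above) =====
theorem determine_bias_spec : Claim_equal_determine_bias := by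
  intro text neu pro_is pro_pa _
  unfold Spec_determine_bias
  simp only [determine_bias, determine_bias_alt]
  rw [count_eq text neu pro_is pro_pa pro_pa (by intro w hw; simp [hw]),
      count_eq text neu pro_is pro_pa neu (by intro w hw; simp [hw]),
      count_eq text neu pro_is pro_pa pro_is (by intro w hw; simp [hw])]
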